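-- pv_equiv track=rewrite | github.com/weewx/weewx | bin/weeutil/weeutil.py | max_with_none
-- ===== SOURCE A (Python) =====
-- def max_with_none(x_seq):
--     """Find the maximum in a (possibly empty) sequence, ignoring Nones.
--
--     While this function is not necessary under Python 2, under Python 3 it is.
--     """
--     xmax = None
--     for x in x_seq:
--         if xmax is None:
--             xmax = x
--         elif x is not None:
--             xmax = max(x, xmax)
--     return xmax
-- ===== SOURCE B (Python) =====
-- def max_with_none(x_seq):
--     """Find the maximum in a (possibly empty) sequence, ignoring Nones."""
--     xs = sorted(x for x in x_seq if x is not None)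
--     return xs[-1] if xs else None
-- ===== Notes on version B (the rewrite author's own statement) =====
-- stated objective: alternative
-- what changed: Instead of a fused accumulator loop with None-state branches, B filters out the Nones, sorts the survivors ascending and returns the last element of the sorted list (None if empty).
import Mathlib
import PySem

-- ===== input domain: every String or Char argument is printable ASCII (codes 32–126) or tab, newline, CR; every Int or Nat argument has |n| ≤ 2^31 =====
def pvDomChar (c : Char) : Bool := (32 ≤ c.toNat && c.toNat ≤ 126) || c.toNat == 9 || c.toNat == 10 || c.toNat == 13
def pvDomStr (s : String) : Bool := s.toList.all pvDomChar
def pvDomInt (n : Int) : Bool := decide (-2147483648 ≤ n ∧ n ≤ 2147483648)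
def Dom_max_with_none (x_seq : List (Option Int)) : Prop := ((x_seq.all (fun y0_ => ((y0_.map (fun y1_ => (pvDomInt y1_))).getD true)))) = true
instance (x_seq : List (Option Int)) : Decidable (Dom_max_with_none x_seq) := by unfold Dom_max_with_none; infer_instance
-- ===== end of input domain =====

-- B replaces A's fused accumulator loop by filter → sort ascending → take the last element (alternative strategy, not faster).


-- ===== PORT A =====
-- literal transliteration of A: fold over the sequence with the xmax accumulator and A's branches
def max_with_none (x_seq : List (Option Int)) : Option Int :=
  x_seq.foldl (fun xmax x =>
    match xmax with
    | none => x
    | some m =>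
      match x with
      | some v => some (max v m)
      | none => some m) none

-- ===== PORT B =====
-- B: drop the Nones, sort ascending, return the last element (xs[-1]); empty -> none
def max_with_none_alt (x_seq : List (Option Int)) : Option Int :=
  let xs := PySem.List.sorted (x_seq.filterMap id) (fun x => x) false
  if xs.isEmpty then none else PySem.List.pyGet? xs (-1)

-- ===== PRECONDITION & SPEC =====
def Spec_max_with_none (x_seq : List (Option Int)) (out : Option Int) : Prop := out = max_with_none_alt x_seq
instance (x_seq : List (Option Int)) (out : Option Int) : Decidable (Spec_max_with_none x_seq out) := by unfold Spec_max_with_none; infer_instance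

-- ===== CLAIM (what is proved, stated in full; the proofs are below) =====
def Claim_equal_max_with_none : Prop := ∀ (x_seq : List (Option Int)), Dom_max_with_none x_seq → Spec_max_with_none x_seq (max_with_none x_seq)

-- ===== LEMMAS AND PROOFS =====

-- A's accumulator once it is some m computes the running max of the remaining non-None elements
lemma mwn_some (t : List (Option Int)) (m : Int) :
    t.foldl (fun xmax x =>
      match xmax with
      | none => x
      | some m =>
        match x with
        | some v => some (max v m)
        | none => some m) (some m)
    = some ((t.filterMap id).foldl max m) := by
  induction t generalizing m with
  | nil => simp
  | cons h t ih =>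
    cases h with
    | none => simpa using ih m
    | some v => simpa [Int.max_comm] using ih (max v m)

-- foldl max is a member of the list and an upper bound
lemma foldl_max_mem (t : List Int) (m : Int) : t.foldl max m ∈ m :: t := by
  induction t generalizing m with
  | nil => simp
  | cons h t ih =>
    have hm := ih (max m h)
    rw [List.foldl_cons]
    rcases List.mem_cons.mp hm with e | e
    · rcases max_choice m h with e2 | e2 <;> rw [e2] at e ⊢ <;> simp [e]
    · simp [e]

lemma foldl_max_ub (t : List Int) (m : Int) : ∀ x ∈ m :: t, x ≤ t.foldl max m := by
  induction t generalizing m with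
  | nil => simp
  | cons h t ih =>
    intro x hx
    rw [List.foldl_cons]
    simp only [List.mem_cons] at hx
    rcases hx with rfl | rfl | hx
    · exact le_trans (le_max_left x h) (ih (max x h) _ (by simp))
    · exact le_trans (le_max_right m x) (ih (max m x) _ (by simp))
    · exact ih (max m h) x (by simp [hx])

-- the last element of a ≤-pairwise list is an upper bound
lemma getLast_ub (l : List Int) (hl : l ≠ []) (hp : l.Pairwise (· ≤ ·)) :
    ∀ x ∈ l, x ≤ l.getLast hl := by
  induction l with
  | nil => simp at hl
  | cons h t ih =>
    intro x hx
    cases t with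
    | nil => simp at hx; simp [hx, List.getLast]
    | cons a s =>
      rw [List.getLast_cons (by simp)]
      rcases List.mem_cons.mp hx with rfl | hx
      · exact List.rel_of_pairwise_cons hp (List.getLast_mem _)
      · exact ih (by simp) (List.Pairwise.of_cons hp) x hx

lemma mwn_eq (xs : List (Option Int)) : max_with_none xs = max_with_none_alt xs := by
  unfold max_with_none max_with_none_alt
  rcases hf : xs.filterMap id with _ | ⟨m, t⟩
  · -- filtered list empty: A's accumulator never leaves none
    have : ∀ (l : List (Option Int)), l.filterMap id = [] →
        l.foldl (fun xmax x =>
          match xmax with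
          | none => x
          | some m =>
            match x with
            | some v => some (max v m)
            | none => some m) none = none := by
      intro l
      induction l with
      | nil => intro _; rfl
      | cons h t ih =>
        cases h with
        | none => intro hl; rw [List.filterMap_cons_none (by rfl)] at hl; exact ih hl
        | some v => intro hl; simp at hl
    simp [this xs hf, PySem.List.sorted]
  · -- filtered list m :: t: A returns some (foldl max m t), B the last of the sorted list
    have hA : xs.foldl (fun xmax x =>
        match xmax with
        | none => x
        | some m =>
          match x with
          | some v => some (max v m)
          | none => some m) none = some (t.foldl max m) := by
      have key : ∀ (l : List (Option Int)) (m : Int) (t : List Int), l.filterMap id = m :: t →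
          l.foldl (fun xmax x =>
            match xmax with
            | none => x
            | some m =>
              match x with
              | some v => some (max v m)
              | none => some m) none = some (t.foldl max m) := by
        intro l
        induction l with
        | nil => intro m t h; simp at h
        | cons h l ih =>
          intro m t hl
          cases h with
          | none => rw [List.filterMap_cons_none (by rfl)] at hl; exact ih m t hl
          | some v =>
            simp only [List.filterMap_cons, id_eq, List.cons.injEq] at hl
            obtain ⟨rfl, rfl⟩ := hl
            simpa using mwn_some l v
      exact key xs m t hf
    rw [hA]
    -- B side
    set s := PySem.List.sorted (m :: t) (fun x => x) false with hs
    have hperm : s.Perm (m :: t) := PySem.List.sorted_perm ..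
    have hsne : s ≠ [] := by
      intro h; have := hperm.length_eq; simp [h] at this
    rw [if_neg (by simp [List.isEmpty_iff, hsne])]
    rw [PySem.List.pyGet?_neg_one, List.getLast?_eq_some_getLast hsne]
    congr 1
    -- both are the maximum of m :: t
    have hpw : s.Pairwise (· ≤ ·) := by
      have := PySem.List.sorted_pairwise (xs := m :: t) (key := fun x => x)
      simpa [← hs] using this
    have h1 : t.foldl max m ≤ s.getLast hsne :=
      getLast_ub s hsne hpw _ (hperm.mem_iff.mpr (foldl_max_mem t m))
    have h2 : s.getLast hsne ≤ t.foldl max m :=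
      foldl_max_ub t m _ (hperm.mem_iff.mp (List.getLast_mem _))
    exact le_antisymm h1 h2

-- ===== VERDICT (by name: the statement is the Claim_ definition above) =====
theorem max_with_none_spec : Claim_equal_max_with_none := fun xs _ => mwn_eq xs
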